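-- pv_equiv track=rewrite | github.com/mariiabond0/PandA-25-26-IR-Starter-Repo-9 | part9/models.py | ansi_highlight
-- ===== SOURCE A (Python) =====
-- from typing import List, Dict, Any, Tuple
--
-- def ansi_highlight(text: str, spans: List[Tuple[int, int]], highlight_mode) -> str:
--     """Return text with ANSI highlight escape codes inserted."""
--     if not spans:
--         return text
--
--     spans = sorted(spans)
--     merged = []
--
--     # Merge overlapping spans
--     current_start, current_end = spans[0]
--     for s, e in spans[1:]:
--         if s <= current_end:
--             current_end = max(current_end, e)
--         else:
--             merged.append((current_start, current_end))
--             current_start, current_end = s, e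
--     merged.append((current_start, current_end))
--
--     if highlight_mode == "GREEN":
--         color_code = "\033[1;92m"  # bold light-green text
--     else:
--         color_code = "\033[43m\033[30m"
--
--     # Build highlighted string
--     out = []
--     i = 0
--     for s, e in merged:
--         out.append(text[i:s])
--         out.append(color_code)
--         out.append(text[s:e])
--         out.append("\033[0m")  # reset
--         i = e
--     out.append(text[i:])
--     return "".join(out)
-- ===== SOURCE B (Python) =====
-- def ansi_highlight(text, spans, highlight_mode):
--     """Return text with ANSI highlight escape codes inserted.
--
--     Right-to-left stack construction: walk the spans in decreasing sorted
--     order, pushing each span onto a stack of disjoint segments and letting it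
--     swallow every segment it reaches, so the merged segments come out
--     back-to-front; the rendering then pairs each segment with its left
--     boundary by zipping against the shifted end list instead of threading a
--     cursor variable.
--     """
--     if not spans:
--         return text
--     color = "\033[1;92m" if highlight_mode == "GREEN" else "\033[43m\033[30m"
--     stack = []  # top of stack = leftmost segment collected so far
--     for s, e in reversed(sorted(spans)):
--         while stack and stack[-1][0] <= e:
--             _, t = stack.pop()
--             if t > e:
--                 e = t
--         stack.append((s, e))
--     segs = stack[::-1]
--     ends = [e for _, e in segs]
--     pieces = [text[i:s] + color + text[s:e] + "\033[0m"
--               for (s, e), i in zip(segs, [0] + ends)]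
--     last = ends[-1] if ends else 0
--     return "".join(pieces) + text[last:]
-- ===== Notes on version B (the rewrite author's own statement) =====
-- stated objective: alternative
-- what changed: B replaces A's left-to-right stateful merge (current_start/current_end accumulator appending finished spans, then a cursor-threading render loop) by a right-to-left sweep that pushes each span onto a stack of disjoint segments, cascading absorption of the segments it reaches (merged list built back-to-front), and renders by zipping each segment with the shifted end list instead of threading a cursor.
import Mathlib
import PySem

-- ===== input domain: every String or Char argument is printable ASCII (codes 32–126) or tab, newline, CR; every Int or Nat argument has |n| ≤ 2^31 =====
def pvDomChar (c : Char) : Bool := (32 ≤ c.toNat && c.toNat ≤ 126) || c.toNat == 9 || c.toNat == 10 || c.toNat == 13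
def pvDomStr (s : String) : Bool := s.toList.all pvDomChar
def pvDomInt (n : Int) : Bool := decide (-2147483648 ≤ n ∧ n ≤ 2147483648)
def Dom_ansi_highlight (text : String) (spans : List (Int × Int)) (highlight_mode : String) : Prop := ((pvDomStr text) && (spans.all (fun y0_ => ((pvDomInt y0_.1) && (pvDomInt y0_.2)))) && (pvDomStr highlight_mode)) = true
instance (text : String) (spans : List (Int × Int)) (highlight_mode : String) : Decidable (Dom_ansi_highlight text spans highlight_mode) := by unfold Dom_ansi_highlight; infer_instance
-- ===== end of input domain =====

-- B builds the merged segments back-to-front (right-to-left stack with cascading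
-- absorption) and renders by zipping segments with the shifted end list instead of
-- A's forward merge accumulator plus cursor-threading render loop (objective: alternative).

-- ===== PORT A =====
-- the merge-loop body of A: state (current_start, current_end, merged)
def pvMergeStep (st : Int × Int × List (Int × Int)) (se : Int × Int) : Int × Int × List (Int × Int) :=
  if se.1 ≤ st.2.1 then (st.1, max st.2.1 se.2, st.2.2)
  else (se.1, se.2, st.2.2 ++ [(st.1, st.2.1)])

-- the output-loop body of A: state (out, i); appends text[i:s], color, text[s:e], reset
def pvEmitStep (t color : List Char) (st : List (List Char) × Int) (p : Int × Int) :
    List (List Char) × Int :=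
  (st.1 ++ [PySem.List.slice t (some st.2) (some p.1), color,
            PySem.List.slice t (some p.1) (some p.2), "\x1B[0m".toList], p.2)

def ansi_highlight (text : String) (spans : List (Int × Int)) (highlight_mode : String) : String :=
  if spans = [] then text
  else
    match PySem.List.sorted2 spans Prod.fst Prod.snd with
    | [] => text  -- unreachable: sorted(spans) of a nonempty list is nonempty
    | (cs0, ce0) :: rest =>
      let fin := rest.foldl pvMergeStep (cs0, ce0, [])
      let merged := fin.2.2 ++ [(fin.1, fin.2.1)]
      let color := (if highlight_mode = "GREEN" then "\x1B[1;92m" else "\x1B[43m\x1B[30m").toList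
      let t := text.toList
      let fo := merged.foldl (pvEmitStep t color) ([], 0)
      String.ofList ((fo.1 ++ [PySem.List.slice t (some fo.2) none]).flatten)

-- ===== PORT B =====
-- B's inner while loop: the pushed span (s, e) absorbs every stack segment it reaches
-- (Python's stack grows at the END; here the list HEAD is the stack top)
def pvCasc (s e : Int) : List (Int × Int) → List (Int × Int)
  | [] => [(s, e)]
  | (s1, t1) :: st => if s1 ≤ e then pvCasc s (if t1 > e then t1 else e) st
                      else (s, e) :: (s1, t1) :: st

def ansi_highlight_alt (text : String) (spans : List (Int × Int)) (highlight_mode : String) : String :=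
  if spans = [] then text
  else
    let color := (if highlight_mode = "GREEN" then "\x1B[1;92m" else "\x1B[43m\x1B[30m").toList
    -- for s, e in reversed(sorted(spans)): push with cascade
    let stack := ((PySem.List.sorted2 spans Prod.fst Prod.snd).reverse).foldl
                   (fun st sp => pvCasc sp.1 sp.2 st) []
    -- Python's stack[::-1] (top last → ascending) is this head-top list read front to back
    let segs := stack
    let ends := segs.map Prod.snd
    let t := text.toList
    let pieces := (List.zip segs ((0 : Int) :: ends)).map (fun pi =>
        PySem.List.slice t (some pi.2) (some pi.1.1) ++ color ++
        PySem.List.slice t (some pi.1.1) (some pi.1.2) ++ "\x1B[0m".toList)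
    let last := (PySem.List.pyGet? ends (-1)).getD 0   -- ends[-1] if ends else 0
    String.ofList (pieces.flatten ++ PySem.List.slice t (some last) none)

-- ===== PRECONDITION & SPEC =====
def Spec_ansi_highlight (text : String) (spans : List (Int × Int)) (highlight_mode : String) (out : String) : Prop := out = ansi_highlight_alt text spans highlight_mode
instance (text : String) (spans : List (Int × Int)) (highlight_mode : String) (out : String) : Decidable (Spec_ansi_highlight text spans highlight_mode out) := by unfold Spec_ansi_highlight; infer_instance

-- ===== CLAIM (what is proved, stated in full; the proofs are below) =====
def Claim_equal_ansi_highlight : Prop := ∀ (text : String) (spans : List (Int × Int)) (highlight_mode : String), Dom_ansi_highlight text spans highlight_mode → Spec_ansi_highlight text spans highlight_mode (ansi_highlight text spans highlight_mode)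

-- ===== LEMMAS AND PROOFS =====

-- the merged spans A's first loop produces, as a recursion
def pvMergeFrom (cs ce : Int) : List (Int × Int) → List (Int × Int)
  | [] => [(cs, ce)]
  | (s, e) :: tl => if s ≤ ce then pvMergeFrom cs (max ce e) tl else (cs, ce) :: pvMergeFrom s e tl

def pvMergeList : List (Int × Int) → List (Int × Int)
  | [] => []
  | (cs, ce) :: tl => pvMergeFrom cs ce tl

-- the string A's second loop renders from a merged list, as a recursion
def pvRender (t color : List Char) (i : Int) : List (Int × Int) → List Char
  | [] => PySem.List.slice t (some i) none
  | (s, e) :: tl =>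
    PySem.List.slice t (some i) (some s) ++ color ++
      PySem.List.slice t (some s) (some e) ++ "\x1B[0m".toList ++ pvRender t color e tl

-- the first merge group of A: absorb the overlapping run, return (group end, remaining spans)
def pvAbsorb (ce : Int) : List (Int × Int) → Int × List (Int × Int)
  | [] => (ce, [])
  | (s, e) :: tl => if s ≤ ce then pvAbsorb (max ce e) tl else (ce, (s, e) :: tl)

theorem pvAbsorb_length (l : List (Int × Int)) : ∀ ce : Int, (pvAbsorb ce l).2.length ≤ l.length := by
  induction l with
  | nil => intro ce; simp [pvAbsorb]
  | cons h tl ih =>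
    intro ce
    obtain ⟨s, e⟩ := h
    simp only [pvAbsorb]
    split
    · exact le_trans (ih _) (Nat.le_succ _)
    · simp

theorem pvMergeStep_spec (l : List (Int × Int)) :
    ∀ (cs ce : Int) (m : List (Int × Int)),
      (l.foldl pvMergeStep (cs, ce, m)).2.2 ++
        [((l.foldl pvMergeStep (cs, ce, m)).1, (l.foldl pvMergeStep (cs, ce, m)).2.1)] =
      m ++ pvMergeFrom cs ce l := by
  induction l with
  | nil => intro cs ce m; simp [pvMergeFrom]
  | cons h tl ih =>
    intro cs ce m
    obtain ⟨s, e⟩ := h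
    by_cases hle : s ≤ ce
    · simp only [List.foldl_cons, pvMergeStep, if_pos hle, pvMergeFrom]
      exact ih cs (max ce e) m
    · simp only [List.foldl_cons, pvMergeStep, if_neg hle, pvMergeFrom]
      rw [ih s e (m ++ [(cs, ce)])]
      simp

theorem pvEmitStep_spec (t color : List Char) (ms : List (Int × Int)) :
    ∀ (acc : List (List Char)) (i : Int),
      ((ms.foldl (pvEmitStep t color) (acc, i)).1 ++
        [PySem.List.slice t (some (ms.foldl (pvEmitStep t color) (acc, i)).2) none]).flatten =
      acc.flatten ++ pvRender t color i ms := by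
  induction ms with
  | nil => intro acc i; simp [pvRender]
  | cons h tl ih =>
    intro acc i
    obtain ⟨s, e⟩ := h
    simp only [List.foldl_cons, pvEmitStep, pvRender]
    rw [ih]
    simp [List.append_assoc]

theorem pvAbsorb_mergeFrom (tl : List (Int × Int)) :
    ∀ (ce cs : Int),
      pvMergeFrom cs ce tl = (cs, (pvAbsorb ce tl).1) :: pvMergeList (pvAbsorb ce tl).2 := by
  induction tl with
  | nil => intro ce cs; simp [pvMergeFrom, pvAbsorb, pvMergeList]
  | cons h tl' ih =>
    intro ce cs
    obtain ⟨s, e⟩ := h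
    by_cases hle : s ≤ ce
    · simp only [pvMergeFrom, pvAbsorb, if_pos hle]
      exact ih (max ce e) cs
    · simp only [pvMergeFrom, pvAbsorb, if_neg hle, pvMergeList]

-- raising the absorption threshold by joining with e commutes with taking the first group
theorem pvAbsorb_raise (tl : List (Int × Int)) :
    ∀ (c e s : Int),
      pvMergeFrom s (max e c) tl =
        pvMergeFrom s (max e (pvAbsorb c tl).1) (pvAbsorb c tl).2 := by
  induction tl with
  | nil => intro c e s; simp [pvAbsorb]
  | cons h tl' ih =>
    intro c e s
    obtain ⟨s1, e1⟩ := h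
    by_cases hle : s1 ≤ c
    · have hle' : s1 ≤ max e c := le_trans hle (le_max_right e c)
      simp only [pvAbsorb, if_pos hle]
      rw [pvMergeFrom, if_pos hle']
      have : max (max e c) e1 = max e (max c e1) := by omega
      rw [this]
      exact ih (max c e1) e s
    · simp only [pvAbsorb, if_neg hle]

-- pushing (s, e) onto the merged stack equals A's merge continued from (s, e)
theorem pvCasc_mergeList (l : List (Int × Int)) :
    ∀ (s e : Int), pvCasc s e (pvMergeList l) = pvMergeFrom s e l := by
  induction hn : l.length using Nat.strong_induction_on generalizing l with
  | _ n ih =>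
    intro s e
    match l with
    | [] => simp [pvMergeList, pvCasc, pvMergeFrom]
    | (s1, e1) :: tl =>
      have hdec := pvAbsorb_mergeFrom tl e1 s1
      simp only [pvMergeList] at *
      rw [hdec, pvCasc]
      by_cases hle : s1 ≤ e
      · rw [if_pos hle]
        have hmax : (if (pvAbsorb e1 tl).1 > e then (pvAbsorb e1 tl).1 else e) =
            max e (pvAbsorb e1 tl).1 := by split <;> omega
        rw [hmax]
        have hlt : (pvAbsorb e1 tl).2.length < n := by
          subst hn; exact Nat.lt_succ_of_le (pvAbsorb_length tl e1)
        have hrec := ih _ hlt (pvAbsorb e1 tl).2 rfl s (max e (pvAbsorb e1 tl).1)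
        rw [hrec]
        rw [pvMergeFrom, if_pos hle]
        exact (pvAbsorb_raise tl e1 e s).symm
      · rw [if_neg hle, pvMergeFrom, if_neg hle, hdec]

-- B's whole stack loop produces A's merged list
theorem pvStack_eq_mergeList (l : List (Int × Int)) :
    (l.reverse).foldl (fun st sp => pvCasc sp.1 sp.2 st) [] = pvMergeList l := by
  rw [List.foldl_reverse]
  induction l with
  | nil => simp [pvMergeList]
  | cons h tl ih =>
    obtain ⟨s, e⟩ := h
    simp only [List.foldr_cons, ih, pvMergeList]
    exact pvCasc_mergeList tl s e

-- chained default of the last end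
theorem pvLastD_cons (e i : Int) (m : List Int) :
    ((e :: m).getLast?).getD i = (m.getLast?).getD e := by
  cases m with
  | nil => simp
  | cons x xs =>
    rw [List.getLast?_cons_cons]
    obtain ⟨y, hy⟩ := Option.isSome_iff_exists.mp (List.getLast?_isSome.mpr (List.cons_ne_nil x xs))
    simp [hy]

-- B's zip rendering equals the cursor-threading rendering
theorem pvZip_render (t color : List Char) (segs : List (Int × Int)) :
    ∀ (i : Int),
      ((List.zip segs (i :: segs.map Prod.snd)).map (fun pi =>
          PySem.List.slice t (some pi.2) (some pi.1.1) ++ color ++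
          PySem.List.slice t (some pi.1.1) (some pi.1.2) ++ "\x1B[0m".toList)).flatten ++
        PySem.List.slice t (some (((segs.map Prod.snd).getLast?).getD i)) none =
      pvRender t color i segs := by
  induction segs with
  | nil => intro i; simp [pvRender]
  | cons h tl ih =>
    intro i
    obtain ⟨s, e⟩ := h
    simp only [List.map_cons, List.zip_cons_cons, List.flatten_cons, pvRender]
    rw [pvLastD_cons]
    rw [← ih e]
    simp [List.append_assoc]

theorem sorted2_ne_nil {spans : List (Int × Int)} (h : spans ≠ []) :
    PySem.List.sorted2 spans Prod.fst Prod.snd ≠ [] := by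
  intro hnil
  have hp := PySem.List.sorted2_perm spans Prod.fst Prod.snd (rev := false)
  rw [hnil] at hp
  exact h hp.symm.eq_nil

-- ===== VERDICT (by name: the statement is the Claim_ definition above) =====
theorem ansi_highlight_spec : Claim_equal_ansi_highlight := by
  intro text spans highlight_mode _
  unfold Spec_ansi_highlight ansi_highlight ansi_highlight_alt
  by_cases hs : spans = []
  · simp [hs]
  · rw [if_neg hs, if_neg hs]
    match hss : PySem.List.sorted2 spans Prod.fst Prod.snd with
    | [] => exact absurd hss (sorted2_ne_nil hs)
    | (cs0, ce0) :: rest =>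
      simp only []
      rw [pvStack_eq_mergeList]
      congr 1
      rw [pvEmitStep_spec, pvMergeStep_spec, PySem.List.pyGet?_neg_one, ← pvZip_render]
      simp [pvMergeList]
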